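-- pv_equiv track=rewrite | github.com/seulbinHwang/Diffusion-Planner | diffusion_planner/data_process/map_process.py | _prune_route_by_connectivity
-- ===== SOURCE A (Python) =====
-- from typing import List, Dict, Tuple, Set, Optional
--
-- def _prune_route_by_connectivity(route_roadblock_ids: List[str],
--                                  roadblock_ids: Set[str]) -> List[str]:
--     """
--     Prune route by overlap with extracted roadblock elements within query radius to maintain connectivity in route
--     feature. Assumes route_roadblock_ids is ordered and connected to begin with.
--     :param route_roadblock_ids: List of roadblock ids representing route.
--     :param roadblock_ids: Set of ids of extracted roadblocks within query radius.
--     :return: List of pruned roadblock ids (connected and within query radius).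
--
--     - roadblock_ids = pruned_lane_roadblock_ids: List[str]
--       - lane_routes 중, route_roadblock_ids 인 친구들
--     """
--     pruned_route_roadblock_ids: List[str] = []
--     route_start = False  # wait for route to come into query radius before declaring broken connection
--
--     for roadblock_id in route_roadblock_ids:
--
--         if roadblock_id in roadblock_ids:
--             pruned_route_roadblock_ids.append(roadblock_id)
--             route_start = True
--
--         elif route_start:  # connection broken
--             break
--
--     return pruned_route_roadblock_ids
-- ===== SOURCE B (Python) =====
-- from typing import List, Set
--
-- def _prune_route_by_connectivity(route_roadblock_ids: List[str],
--                                  roadblock_ids: Set[str]) -> List[str]: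
--     # Compute a membership bitmap once, locate the boundary indices of the
--     # first in-radius run with list.index, and return a slice of the route.
--     flags = [rid in roadblock_ids for rid in route_roadblock_ids]
--     try:
--         start = flags.index(True)
--     except ValueError:
--         return []
--     try:
--         stop = flags.index(False, start)
--     except ValueError:
--         stop = len(flags)
--     return route_roadblock_ids[start:stop]
-- ===== Notes on version B (the rewrite author's own statement) =====
-- stated objective: alternative
-- what changed: Instead of accumulating elements in a flag-driven loop, B builds a membership bitmap, finds the run's boundary indices with list.index, and returns a slice of the input list.
import Mathlib
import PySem

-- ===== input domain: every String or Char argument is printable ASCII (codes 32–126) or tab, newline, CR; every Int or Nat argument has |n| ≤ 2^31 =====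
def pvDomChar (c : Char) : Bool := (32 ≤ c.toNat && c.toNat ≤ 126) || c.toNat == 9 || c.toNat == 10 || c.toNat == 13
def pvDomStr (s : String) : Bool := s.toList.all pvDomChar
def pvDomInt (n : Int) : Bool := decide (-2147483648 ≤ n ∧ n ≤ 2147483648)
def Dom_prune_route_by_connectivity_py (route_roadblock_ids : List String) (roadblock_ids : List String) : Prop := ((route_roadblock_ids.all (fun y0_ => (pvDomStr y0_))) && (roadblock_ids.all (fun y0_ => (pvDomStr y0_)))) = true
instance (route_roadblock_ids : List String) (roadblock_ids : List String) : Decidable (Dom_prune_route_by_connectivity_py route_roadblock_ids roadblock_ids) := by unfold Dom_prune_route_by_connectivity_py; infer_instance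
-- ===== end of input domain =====

-- B computes boundary indices on a membership bitmap and slices the route, instead of A's flag-driven accumulating loop (alternative decomposition, same cost).

-- ===== PORT A =====
-- A: loop with a route_start flag; append members, break on first non-member after start
def pruneGoA (roadblock_ids : List String) (route_start : Bool) : List String → List String
  | [] => []
  | x :: xs =>
    if roadblock_ids.contains x then x :: pruneGoA roadblock_ids true xs
    else if route_start then []
    else pruneGoA roadblock_ids route_start xs

def prune_route_by_connectivity_py (route_roadblock_ids : List String) (roadblock_ids : List String) : List String :=
  pruneGoA roadblock_ids false route_roadblock_ids

-- ===== PORT B =====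
-- B: membership bitmap + list.index boundaries + slice.
-- flags.index(False, start) is ported step-for-step as searching flags.drop start and adding start back.
def prune_route_by_connectivity_py_alt (route_roadblock_ids : List String) (roadblock_ids : List String) : List String :=
  let flags := route_roadblock_ids.map (fun rid => roadblock_ids.contains rid)
  match PySem.List.index? flags true with
  | none => []
  | some start =>
    let stop : Nat :=
      match PySem.List.index? (flags.drop start) false with
      | some j => start + j
      | none => flags.length
    PySem.List.slice route_roadblock_ids (some (start : Int)) (some (stop : Int))

-- ===== PRECONDITION & SPEC =====
def Spec_prune_route_by_connectivity_py (route_roadblock_ids : List String) (roadblock_ids : List String) (out : List String) : Prop := out = prune_route_by_connectivity_py_alt route_roadblock_ids roadblock_ids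
instance (route_roadblock_ids : List String) (roadblock_ids : List String) (out : List String) : Decidable (Spec_prune_route_by_connectivity_py route_roadblock_ids roadblock_ids out) := by unfold Spec_prune_route_by_connectivity_py; infer_instance

-- ===== CLAIM =====
def Claim_equal_prune_route_by_connectivity_py : Prop := ∀ (route_roadblock_ids : List String) (roadblock_ids : List String), Dom_prune_route_by_connectivity_py route_roadblock_ids roadblock_ids → Spec_prune_route_by_connectivity_py route_roadblock_ids roadblock_ids (prune_route_by_connectivity_py route_roadblock_ids roadblock_ids)

-- ===== LEMMAS AND PROOFS =====

-- after the route has started, A takes the run of members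
lemma pruneGoA_true (rb : List String) (l : List String) :
    pruneGoA rb true l = l.takeWhile (fun x => rb.contains x) := by
  induction l with
  | nil => rfl
  | cons x xs ih =>
    simp only [pruneGoA, List.takeWhile]
    by_cases h : x ∈ rb <;> simp [h, ih]

-- taking up to the first false flag is takeWhile of the predicate
lemma take_idx_false (c : String → Bool) (l : List String) :
    l.take (match PySem.List.index? (l.map c) false with
            | some j => j
            | none => (l.map c).length) = l.takeWhile c := by
  induction l with
  | nil => rfl
  | cons x xs ih =>
    by_cases h : c x = true
    · rw [List.map_cons, h, PySem.List.index?_cons_of_ne _ (by decide : true ≠ false)]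
      cases hix : PySem.List.index? (xs.map c) false with
      | none =>
        rw [hix] at ih
        simp only [List.length_map, List.take_length] at ih
        simp only [Option.map_none, List.length_cons, List.length_map]
        rw [List.take_succ_cons]
        simp [List.takeWhile, h, List.take_length, ← ih]
      | some j =>
        rw [hix] at ih
        dsimp only at ih
        simp only [Option.map_some]
        rw [List.take_succ_cons]
        simp [List.takeWhile, h, ih]
    · simp only [Bool.not_eq_true] at h
      rw [List.map_cons, h, PySem.List.index?_cons_self]
      simp [List.takeWhile, h]

theorem prune_route_by_connectivity_py_spec : Claim_equal_prune_route_by_connectivity_py := by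
  intro r rb hdom
  unfold Spec_prune_route_by_connectivity_py prune_route_by_connectivity_py prune_route_by_connectivity_py_alt
  induction r with
  | nil => rfl
  | cons x xs ih =>
    simp only [List.map_cons]
    by_cases h : rb.contains x = true
    · -- start = 0: result is (x::xs).take (first false)
      rw [h, PySem.List.index?_cons_self]
      have hm : x ∈ rb := by simpa using h
      have hA : pruneGoA rb false (x :: xs) = (x :: xs).takeWhile (fun rid => rb.contains rid) := by
        simp [pruneGoA, hm, pruneGoA_true, List.takeWhile]
      have ht := take_idx_false (fun rid => rb.contains rid) (x :: xs)
      rw [List.map_cons, h] at ht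
      rw [hA, ← ht]
      simp only [List.drop_zero]
      cases hix : PySem.List.index? (true :: xs.map (fun rid => rb.contains rid)) false with
      | none => rw [PySem.List.slice_natCast]; simp
      | some j => rw [PySem.List.slice_natCast]; simp
    · -- x not a member: A skips it, and B's indices shift by one
      simp only [Bool.not_eq_true] at h
      have hm : x ∉ rb := by simpa using h
      have hA : pruneGoA rb false (x :: xs) = pruneGoA rb false xs := by
        simp [pruneGoA, hm]
      have hdx : Dom_prune_route_by_connectivity_py xs rb := by
        unfold Dom_prune_route_by_connectivity_py at hdom ⊢
        simp only [List.all_cons, Bool.and_eq_true] at hdom ⊢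
        tauto
      rw [h, PySem.List.index?_cons_of_ne _ (by decide : false ≠ true), hA, ih hdx]
      dsimp only
      cases hix : PySem.List.index? (xs.map (fun rid => rb.contains rid)) true with
      | none => simp
      | some s =>
        simp only [Option.map_some, List.drop_succ_cons, List.length_cons, List.length_map]
        cases hjx : PySem.List.index? ((xs.map (fun rid => rb.contains rid)).drop s) false with
        | none =>
          rw [PySem.List.slice_natCast, PySem.List.slice_natCast]
          simp only [List.drop_succ_cons]
          congr 1
          omega
        | some j =>
          rw [PySem.List.slice_natCast, PySem.List.slice_natCast]
          simp only [List.drop_succ_cons]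
          congr 1
          omega
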